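-- pv_equiv track=rewrite | github.com/DivyanshBhatia/visprompt-agent | scripts/run_critic_ablation.py | get_similar_classes
-- ===== SOURCE A (Python) =====
-- def get_similar_classes(class_name, all_class_names, n=5):
--     """Get similar class names for distinctiveness prompting."""
--     # Simple heuristic: classes with shared words or similar length
--     cn_lower = class_name.lower().split()
--     scored = []
--     for other in all_class_names:
--         if other == class_name:
--             continue
--         other_lower = other.lower().split()
--         shared = len(set(cn_lower) & set(other_lower))
--         scored.append((other, shared))
--     scored.sort(key=lambda x: -x[1])
--     return [s[0] for s in scored[:n]]
-- ===== SOURCE B (Python) =====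
-- def get_similar_classes(class_name, all_class_names, n=5):
--     """Get similar class names for distinctiveness prompting."""
--     cn = set(class_name.lower().split())
--     buckets = {}
--     max_shared = 0
--     for other in all_class_names:
--         if other == class_name:
--             continue
--         shared = len(cn & set(other.lower().split()))
--         buckets.setdefault(shared, []).append(other)
--         max_shared = max(max_shared, shared)
--     result = []
--     for c in range(max_shared, -1, -1):
--         result.extend(buckets.get(c, []))
--     return result[:n]
-- ===== Notes on version B (the rewrite author's own statement) =====
-- stated objective: alternative
-- what changed: B replaces A's build-pairs-then-stable-sort with a single counting pass that groups candidate names into a dict of buckets keyed by shared-word count plus a running maximum, then concatenates the buckets from the highest count down to 0, which reproduces the stable descending order exactly.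
import Mathlib
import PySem

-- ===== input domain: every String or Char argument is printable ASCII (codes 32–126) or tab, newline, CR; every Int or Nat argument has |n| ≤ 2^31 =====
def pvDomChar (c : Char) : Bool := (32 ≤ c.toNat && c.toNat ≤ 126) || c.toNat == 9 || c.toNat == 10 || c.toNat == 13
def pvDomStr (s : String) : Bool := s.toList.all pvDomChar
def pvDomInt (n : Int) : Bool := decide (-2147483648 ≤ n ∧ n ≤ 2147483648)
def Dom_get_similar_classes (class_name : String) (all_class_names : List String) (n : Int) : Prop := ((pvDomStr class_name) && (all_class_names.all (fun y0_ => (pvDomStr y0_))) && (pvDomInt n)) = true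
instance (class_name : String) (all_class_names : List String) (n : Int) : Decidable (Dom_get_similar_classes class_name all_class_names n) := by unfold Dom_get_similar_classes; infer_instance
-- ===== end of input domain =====

-- B replaces A's stable sort on (name, shared) pairs by a counting/bucket pass (dict keyed by
-- shared-word count, read from the maximum count down to 0) — an alternative algorithm, same result.

-- ===== PORT A =====
def get_similar_classes (class_name : String) (all_class_names : List String) (n : Int) : List String :=
  let cn_lower := PySem.Str.split₀ (PySem.Str.lower class_name)
  let scored := all_class_names.foldl (fun acc other =>
    if other == class_name then acc
    else acc ++ [(other,
      ((PySem.Set.inter (PySem.Set.ofList cn_lower)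
        (PySem.Set.ofList (PySem.Str.split₀ (PySem.Str.lower other)))).length : Int))]) []
  (PySem.List.slice (PySem.List.sorted scored (fun x => -x.2) false) none (some n)).map (fun s => s.1)

-- ===== PORT B =====
def get_similar_classes_alt (class_name : String) (all_class_names : List String) (n : Int) : List String :=
  let cn := PySem.Set.ofList (PySem.Str.split₀ (PySem.Str.lower class_name))
  let st := all_class_names.foldl (fun st other =>
    if other == class_name then st
    else
      let shared : Int := (PySem.Set.inter cn (PySem.Set.ofList (PySem.Str.split₀ (PySem.Str.lower other)))).length
      (st.1.modify shared [] (fun l => l ++ [other]), max st.2 shared))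
    ((PySem.Dict.empty : PySem.Dict Int (List String)), (0 : Int))
  let result := (PySem.List.pyRange st.2 (-1) (-1)).foldl (fun acc c => acc ++ st.1.getD c []) []
  PySem.List.slice result none (some n)

-- ===== PRECONDITION & SPEC =====
def Spec_get_similar_classes (class_name : String) (all_class_names : List String) (n : Int) (out : List String) : Prop := out = get_similar_classes_alt class_name all_class_names n
instance (class_name : String) (all_class_names : List String) (n : Int) (out : List String) : Decidable (Spec_get_similar_classes class_name all_class_names n out) := by unfold Spec_get_similar_classes; infer_instance

-- ===== CLAIM (what is proved, stated in full; the proofs are below) =====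
def Claim_equal_get_similar_classes : Prop := ∀ (class_name : String) (all_class_names : List String) (n : Int), Dom_get_similar_classes class_name all_class_names n → Spec_get_similar_classes class_name all_class_names n (get_similar_classes class_name all_class_names n)

-- ===== LEMMAS AND PROOFS =====

-- a 'for x in l: if q(x): continue; …' loop is a fold over the kept elements
theorem pv_foldl_skip_flip {σ α : Type} (q : α → Bool) (f : σ → α → σ) (l : List α) (init : σ) :
    l.foldl (fun acc x => if q x then acc else f acc x) init
      = (l.filter (fun x => !q x)).foldl f init := by
  rw [← PySem.List.foldl_if_eq_foldl_filter (fun x => !q x) f]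
  exact PySem.List.foldl_congr_mem _ _ _ _ (fun acc x _ => by cases h : q x <;> simp)

-- slicing commutes with map (the slice is position-based; map keeps length)
theorem pv_slice_map {α β : Type} (f : α → β) (l : List α) (a b : Option Int) :
    PySem.List.slice (l.map f) a b = (PySem.List.slice l a b).map f := by
  simp [PySem.List.slice, List.map_take, List.map_drop]

-- range(m, -1, -1) for 0 ≤ m, as a map over List.range
theorem pv_pyRange_desc (m : Int) (h : 0 ≤ m) :
    PySem.List.pyRange m (-1) (-1) = (List.range (m.toNat + 1)).map (fun (k : Nat) => m - (k : Int)) := by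
  simp only [PySem.List.pyRange]
  rw [if_neg (by norm_num), if_neg (by norm_num), if_pos (by omega)]
  have hd : (m - -1 + - -1 - 1) / - -1 = m + 1 := by norm_num
  rw [hd]
  have hc : (m + 1).toNat = m.toNat + 1 := by omega
  rw [hc]
  exact List.map_congr_left (fun k _ => by ring)

theorem pv_insertBy_skip {α : Type} (before : α → α → Bool) (x : α) (A B : List α)
    (h : ∀ a ∈ A, before x a = false) :
    PySem.List.insertBy before x (A ++ B) = A ++ PySem.List.insertBy before x B := by
  induction A with
  | nil => simp
  | cons a A ih =>
    have ha : before x a = false := h a (by simp)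
    simp only [List.cons_append, PySem.List.insertBy, ha]
    simp only [Bool.false_eq_true, if_false]
    rw [ih (fun a ha' => h a (by simp [ha']))]

theorem pv_insertBy_front {α : Type} (before : α → α → Bool) (x : α) (B : List α)
    (h : ∀ a ∈ B, before x a = true) :
    PySem.List.insertBy before x B = x :: B := by
  cases B with
  | nil => simp [PySem.List.insertBy]
  | cons b bs => simp [PySem.List.insertBy, h b (by simp)]

-- the stable sort by an Int key is the concatenation of the key-buckets, in ascending key order
theorem pv_sorted_eq_flatMap_filter {α : Type} (key : α → Int) (ks : List Int)
    (hks : ks.Pairwise (· < ·)) :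
    ∀ l : List α, (∀ x ∈ l, key x ∈ ks) →
      PySem.List.sorted l key false = ks.flatMap (fun k => l.filter (fun x => key x == k)) := by
  intro l
  induction l using List.reverseRecOn with
  | nil => intro _; simp [PySem.List.sorted_eq_foldl_insertBy]
  | append_singleton l x ih =>
    intro hcov
    have hx : key x ∈ ks := hcov x (by simp)
    obtain ⟨ks1, ks2, rfl⟩ := List.append_of_mem hx
    have hpw := hks
    rw [List.pairwise_append] at hpw
    obtain ⟨hpw1, hpw2, hcross⟩ := hpw
    rw [List.pairwise_cons] at hpw2
    obtain ⟨hlt2, _⟩ := hpw2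
    have hlt1 : ∀ k ∈ ks1, k < key x := fun k hk => hcross k hk (key x) (by simp)
    have hsl : PySem.List.sorted l key false
        = (ks1 ++ key x :: ks2).flatMap (fun k => l.filter (fun x => key x == k)) :=
      ih (fun y hy => hcov y (by simp [hy]))
    rw [PySem.List.sorted_eq_foldl_insertBy, List.foldl_append, ← PySem.List.sorted_eq_foldl_insertBy,
      hsl, List.foldl_cons, List.foldl_nil]
    set F : Int → List α := fun k => l.filter (fun y => key y == k) with hF
    have hkeyF : ∀ k, ∀ a ∈ F k, key a = k := by
      intro k a ha
      exact beq_iff_eq.mp (List.mem_filter.mp ha).2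
    have hsplit : (ks1 ++ key x :: ks2).flatMap F
        = (ks1.flatMap F ++ F (key x)) ++ ks2.flatMap F := by
      simp [List.flatMap_append, List.append_assoc]
    rw [hsplit]
    rw [pv_insertBy_skip _ x _ _ (by
      intro a ha
      rcases List.mem_append.mp ha with ha | ha
      · obtain ⟨k, hk, hak⟩ := List.mem_flatMap.mp ha
        have hka := hkeyF k a hak
        have hklt := hlt1 k hk
        simp only [decide_eq_false_iff_not, hka, not_lt]
        omega
      · have hka := hkeyF (key x) a ha
        simp only [decide_eq_false_iff_not, hka, not_lt]
        exact le_refl _)]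
    rw [pv_insertBy_front _ x _ (by
      intro a ha
      obtain ⟨k, hk, hak⟩ := List.mem_flatMap.mp ha
      have hka := hkeyF k a hak
      have hk2 := hlt2 k hk
      simp only [decide_eq_true_eq, hka]
      omega)]
    -- now compute the right-hand side buckets of l ++ [x]
    have hFr : ∀ k, (l ++ [x]).filter (fun y => key y == k)
        = F k ++ (if key x = k then [x] else []) := by
      intro k
      by_cases hxk : key x = k <;> simp [hF, List.filter_append, hxk]
    rw [List.flatMap_append, List.flatMap_cons]
    have h1 : ks1.flatMap (fun k => (l ++ [x]).filter (fun y => key y == k)) = ks1.flatMap F := by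
      apply List.flatMap_congr
      intro k hk
      have hne : key x ≠ k := by have := hlt1 k hk; omega
      simp [hFr, hne]
    have h2 : ks2.flatMap (fun k => (l ++ [x]).filter (fun y => key y == k)) = ks2.flatMap F := by
      apply List.flatMap_congr
      intro k hk
      have hne : key x ≠ k := by have := hlt2 k hk; omega
      simp [hFr, hne]
    rw [h1, h2, hFr (key x)]
    simp [List.append_assoc]

-- the heart of the equivalence: names of the stably-sorted pairs = descending-count buckets
theorem pv_big (score : String → Int) (h0 : ∀ o, 0 ≤ score o) (cand : List String) :
    ((PySem.List.sorted (cand.map (fun o => (o, score o))) (fun x => -x.2) false).map (fun s => s.1))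
      = (PySem.List.pyRange (cand.foldl (fun m o => max m (score o)) 0) (-1) (-1)).flatMap
          (fun c => cand.filter (fun o => score o == c)) := by
  set mx := cand.foldl (fun m o => max m (score o)) 0 with hmx
  obtain ⟨hmx0, hmxub⟩ := PySem.List.le_foldl_max_int cand score 0
  have hdesc := pv_pyRange_desc mx hmx0
  set ks : List Int := (PySem.List.pyRange mx (-1) (-1)).map (fun c => -c) with hks
  have hksr : ks = (List.range (mx.toNat + 1)).map (fun (k : Nat) => -(mx - (k : Int))) := by
    rw [hks, hdesc, List.map_map]; rfl
  have hkpw : ks.Pairwise (· < ·) := by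
    rw [hksr, List.pairwise_map]
    exact List.pairwise_lt_range.imp (fun {i j} hij => by omega)
  have hcov : ∀ p ∈ cand.map (fun o => (o, score o)), -(p.2) ∈ ks := by
    intro p hp
    obtain ⟨o, ho, rfl⟩ := List.mem_map.mp hp
    show -(score o) ∈ ks
    rw [hksr]
    have h1 := h0 o
    have h2 := hmxub o ho
    refine List.mem_map.mpr ⟨(mx - score o).toNat, List.mem_range.mpr (by omega), ?_⟩
    show -(mx - ((mx - score o).toNat : Int)) = -(score o)
    omega
  rw [pv_sorted_eq_flatMap_filter _ ks hkpw _ hcov, List.map_flatMap, hks, List.flatMap_map]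
  apply List.flatMap_congr
  intro c _
  rw [List.filter_map, List.map_map]
  have hq : ((fun x : String × Int => -x.2 == -c) ∘ (fun o : String => (o, score o)))
      = fun o => score o == c := by
    funext o
    by_cases h : score o = c <;> simp [h]
  rw [hq]
  have hid : ((fun s : String × Int => s.1) ∘ (fun o : String => (o, score o))) = id := rfl
  rw [hid, List.map_id]

-- the whole function, with the shared word-overlap score abstracted out
theorem pv_main (score : String → Int) (h0 : ∀ o, 0 ≤ score o)
    (class_name : String) (all : List String) (n : Int) :
    (PySem.List.slice (PySem.List.sorted
        (all.foldl (fun acc other => if other == class_name then acc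
          else acc ++ [(other, score other)]) [])
        (fun x => -x.2) false) none (some n)).map (fun s => s.1)
    = PySem.List.slice
        ((PySem.List.pyRange
            (all.foldl (fun st other => if other == class_name then st
              else (st.1.insert (score other) (st.1.getD (score other) [] ++ [other]), max st.2 (score other)))
              ((PySem.Dict.empty : PySem.Dict Int (List String)), (0:Int))).2 (-1) (-1)).foldl
          (fun acc c => acc ++ (all.foldl (fun st other => if other == class_name then st
              else (st.1.insert (score other) (st.1.getD (score other) [] ++ [other]), max st.2 (score other)))
              ((PySem.Dict.empty : PySem.Dict Int (List String)), (0:Int))).1.getD c []) [])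
        none (some n) := by
  rw [pv_foldl_skip_flip (fun o => o == class_name) (fun acc o => acc ++ [(o, score o)])]
  rw [pv_foldl_skip_flip (fun o => o == class_name)
    (fun st o => (PySem.Dict.insert st.1 (score o) (PySem.Dict.getD st.1 (score o) [] ++ [o]), max st.2 (score o)))]
  rw [PySem.List.foldl_prod_mk
    (f := fun d o => PySem.Dict.insert d (score o) (PySem.Dict.getD d (score o) [] ++ [o]))
    (g := fun m o => max m (score o))]
  set cand := all.filter (fun o => !(o == class_name)) with hcand
  rw [PySem.List.foldl_append_singleton_eq_map (fun o => (o, score o)) _ [], List.nil_append]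
  dsimp only
  have hdict : ∀ c : Int,
      (cand.foldl (fun d o => PySem.Dict.insert d (score o) (PySem.Dict.getD d (score o) [] ++ [o]))
        PySem.Dict.empty).getD c []
      = cand.filter (fun o => score o == c) := by
    intro c
    have hfold : cand.foldl (fun d o => PySem.Dict.insert d (score o) (PySem.Dict.getD d (score o) [] ++ [o]))
        PySem.Dict.empty
        = (cand.map (fun o => (score o, o))).foldl
            (fun d p => d.modify p.1 [] (fun v => v ++ [p.2])) PySem.Dict.empty := by
      rw [List.foldl_map]; rfl
    rw [hfold, PySem.Dict.getD_foldl_modify_append, PySem.Dict.getD_empty, List.nil_append,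
      List.filter_map, List.map_map]
    have hcmp : ((fun p : Int × String => p.1 == c) ∘ fun o => (score o, o)) = fun o => score o == c := rfl
    rw [hcmp]
    have hid : ((fun p : Int × String => p.2) ∘ fun o : String => (score o, o)) = id := rfl
    rw [hid, List.map_id]
  simp only [hdict]
  rw [PySem.List.foldl_append_eq_flatMap (fun c => cand.filter (fun o => score o == c)) _ []]
  rw [List.nil_append, ← pv_big score h0 cand, pv_slice_map]

-- ===== VERDICT (by name: the statement is the Claim_ definition above) =====
theorem get_similar_classes_spec : Claim_equal_get_similar_classes := by
  intro class_name all_class_names n _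
  unfold Spec_get_similar_classes get_similar_classes get_similar_classes_alt
  exact pv_main
    (fun o => ((PySem.Set.inter (PySem.Set.ofList (PySem.Str.split₀ (PySem.Str.lower class_name)))
      (PySem.Set.ofList (PySem.Str.split₀ (PySem.Str.lower o)))).length : Int))
    (fun o => Int.natCast_nonneg _) class_name all_class_names n
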